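-- pv_equiv track=rewrite | github.com/asui1/natural-language-process | cs372 hw3/CS372_HW3_code_20160632.py | homo_counter
-- ===== SOURCE A (Python) =====
-- def homo_counter(words):
--     count = 0
--     dups = []
--     for i in range(len(words)-1):
--         for j in range(i+1, len(words)):
--             if words[i][2].lower() == words[j][2].lower() and words[i][1] != words[j][1] and words[i][2].lower() not in dups:
--                 dups.append(words[i][2].lower())
--                 count +=1
--     return count
-- ===== SOURCE B (Python) =====
-- def homo_counter(words):
--     # One forward pass: remember the first spelling seen for each lowercased
--     # pronunciation key; a key joins `multi` once a different spelling appears.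
--     first = {}
--     multi = set()
--     for w in words:
--         key = w[2].lower()
--         spelling = w[1]
--         if key in first:
--             if first[key] != spelling:
--                 multi.add(key)
--         else:
--             first[key] = spelling
--     return len(multi)
-- ===== Notes on version B (the rewrite author's own statement) =====
-- stated objective: alternative
-- what changed: Replaces A's all-pairs scan (with a dups list for deduplication) by a single forward pass keeping a dict from lowercased pronunciation key to the first spelling seen and a set of keys already observed with a second distinct spelling, returning that set's size.
-- outside the precondition, e.g. on homo_counter([('x',)]): A returns 0, B raises IndexError; on homo_counter([('a', 'b', 'c'), ('x',)]): A raises IndexError, B raises IndexError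
import Mathlib
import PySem

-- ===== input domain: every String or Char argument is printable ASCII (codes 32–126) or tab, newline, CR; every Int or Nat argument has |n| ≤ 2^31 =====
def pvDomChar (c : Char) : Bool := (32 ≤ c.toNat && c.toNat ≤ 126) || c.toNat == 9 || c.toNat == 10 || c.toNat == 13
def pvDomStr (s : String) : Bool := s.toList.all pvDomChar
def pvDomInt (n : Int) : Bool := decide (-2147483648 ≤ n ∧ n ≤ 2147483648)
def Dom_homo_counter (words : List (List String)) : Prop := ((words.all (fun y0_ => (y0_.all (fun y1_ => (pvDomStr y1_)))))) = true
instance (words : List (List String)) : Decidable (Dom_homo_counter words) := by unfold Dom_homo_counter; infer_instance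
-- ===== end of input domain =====

-- B replaces A's all-pairs scan with one forward pass over the words (dict of first
-- spellings + set of keys seen with a second distinct spelling); equivalence of the return
-- values is proved on Pre_ (every word has at least 3 fields). Index accesses are ported with
-- the defaulting variant pyGetD; inputs where Python would raise IndexError are outside Pre_.

-- ===== PORT A =====
def homo_counter (words : List (List String)) : Int :=
  let st :=
    (PySem.List.pyRange 0 (PySem.List.len words - 1)).foldl
      (fun (st : Int × List String) i =>
        (PySem.List.pyRange (i + 1) (PySem.List.len words)).foldl
          (fun st j =>
            if PySem.Str.lower (PySem.List.pyGetD (PySem.List.pyGetD words i []) 2 "")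
                 == PySem.Str.lower (PySem.List.pyGetD (PySem.List.pyGetD words j []) 2 "")
               && PySem.List.pyGetD (PySem.List.pyGetD words i []) 1 ""
                 != PySem.List.pyGetD (PySem.List.pyGetD words j []) 1 ""
               && !(st.2.contains (PySem.Str.lower (PySem.List.pyGetD (PySem.List.pyGetD words i []) 2 "")))
            then (st.1 + 1, st.2 ++ [PySem.Str.lower (PySem.List.pyGetD (PySem.List.pyGetD words i []) 2 "")])
            else st)
          st)
      ((0 : Int), ([] : List String))
  st.1

-- ===== PORT B =====
def homo_counter_alt (words : List (List String)) : Int :=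
  let st :=
    words.foldl
      (fun (st : PySem.Dict String String × PySem.Set String) w =>
        if st.1.contains (PySem.Str.lower (PySem.List.pyGetD w 2 "")) then
          if st.1.getD (PySem.Str.lower (PySem.List.pyGetD w 2 "")) "" != PySem.List.pyGetD w 1 ""
          then (st.1, PySem.Set.add st.2 (PySem.Str.lower (PySem.List.pyGetD w 2 "")))
          else st
        else (st.1.insert (PySem.Str.lower (PySem.List.pyGetD w 2 "")) (PySem.List.pyGetD w 1 ""), st.2))
      (PySem.Dict.empty, PySem.Set.empty)
  PySem.Set.len st.2

-- ===== PRECONDITION & SPEC =====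
-- Pre_ excludes lists containing a word with fewer than 3 fields: on those the Python A raises
-- IndexError as soon as the list has 2 or more words, and returns 0 only accidentally (its pair
-- loop never touches the fields) when the list has at most 1 word, while B raises there too.
def Pre_homo_counter (words : List (List String)) : Prop := ∀ w ∈ words, 3 ≤ w.length
instance (words : List (List String)) : Decidable (Pre_homo_counter words) := by unfold Pre_homo_counter; infer_instance
def pvWitness_homo_counter : List (List String) := [["ab", "a", "AB"], ["ab", "b", "ab"]]
def Spec_homo_counter (words : List (List String)) (out : Int) : Prop := out = homo_counter_alt words
instance (words : List (List String)) (out : Int) : Decidable (Spec_homo_counter words out) := by unfold Spec_homo_counter; infer_instance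

-- ===== CLAIM (what is proved, stated in full; the proofs are below) =====
def Claim_equal_homo_counter : Prop := ∀ (words : List (List String)), Dom_homo_counter words → Pre_homo_counter words → Spec_homo_counter words (homo_counter words)

-- ===== LEMMAS AND PROOFS =====

-- the lowercased pronunciation key and the spelling of a word (fields 2 and 1)
def keyOf (w : List String) : String := PySem.Str.lower (PySem.List.pyGetD w 2 "")
def spOf (w : List String) : String := PySem.List.pyGetD w 1 ""

-- the body of A's inner loop, with both words abstracted
def stepA (wi : List String) (st : Int × List String) (wj : List String) : Int × List String :=
  if keyOf wi == keyOf wj && spOf wi != spOf wj && !(st.2.contains (keyOf wi))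
  then (st.1 + 1, st.2 ++ [keyOf wi]) else st

-- A's pair loop as a structural recursion: pair the head with every later word, recurse on the tail
def pairsA : List (List String) → Int × List String → Int × List String
  | [], st => st
  | w :: t, st => pairsA t (t.foldl (stepA w) st)

-- the body of B's loop
def stepB (st : PySem.Dict String String × PySem.Set String) (w : List String) :
    PySem.Dict String String × PySem.Set String :=
  if st.1.contains (keyOf w) then
    if st.1.getD (keyOf w) "" != spOf w then (st.1, PySem.Set.add st.2 (keyOf w)) else st
  else (st.1.insert (keyOf w) (spOf w), st.2)

-- k is a pronunciation key carried by two words of ws with different spellings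
def multiKey (ws : List (List String)) (k : String) : Prop :=
  ∃ w1 ∈ ws, ∃ w2 ∈ ws, keyOf w1 = k ∧ keyOf w2 = k ∧ spOf w1 ≠ spOf w2

-- first spelling recorded for key k while scanning p
def firstSp (p : List (List String)) (k : String) : Option String :=
  (p.find? (fun w => keyOf w == k)).map spOf

lemma foldl_stepA (w : List String) : ∀ (t : List (List String)) (st : Int × List String),
    t.foldl (stepA w) st =
      if keyOf w ∉ st.2 ∧ ∃ x ∈ t, keyOf w = keyOf x ∧ spOf w ≠ spOf x
      then (st.1 + 1, st.2 ++ [keyOf w]) else st := by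
  intro t
  induction t with
  | nil => intro st; simp
  | cons x t ih =>
    intro st
    rw [List.foldl_cons, ih]
    by_cases hk : keyOf w = keyOf x
    · by_cases hs : spOf w = spOf x
      · have hx : stepA w st x = st := by simp [stepA, hk, hs]
        rw [hx]
        refine if_congr (and_congr_right' ?_) rfl rfl
        constructor
        · rintro ⟨y, hy, h1, h2⟩; exact ⟨y, List.mem_cons_of_mem _ hy, h1, h2⟩
        · rintro ⟨y, hy, h1, h2⟩
          rcases List.mem_cons.1 hy with rfl | hy
          · exact (h2 hs).elim
          · exact ⟨y, hy, h1, h2⟩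
      · by_cases hm : keyOf w ∈ st.2
        · have hx : stepA w st x = st := by simp [stepA, hm]
          rw [hx]; simp [hm]
        · have hx : stepA w st x = (st.1 + 1, st.2 ++ [keyOf w]) := by
            have hcond : (keyOf w == keyOf x && (spOf w != spOf x)
                && !(st.2.contains (keyOf w))) = true := by
              simp only [Bool.and_eq_true, beq_iff_eq, bne_iff_ne, Bool.not_eq_true']
              refine ⟨⟨hk, hs⟩, by simpa using hm⟩
            simp only [stepA]
            rw [if_pos hcond]
          rw [hx]
          rw [if_neg (fun h => h.1 (by simp)), if_pos ⟨hm, x, List.mem_cons_self, hk, hs⟩]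
    · have hx : stepA w st x = st := by simp [stepA, hk]
      rw [hx]
      refine if_congr (and_congr_right' ?_) rfl rfl
      constructor
      · rintro ⟨y, hy, h1, h2⟩; exact ⟨y, List.mem_cons_of_mem _ hy, h1, h2⟩
      · rintro ⟨y, hy, h1, h2⟩
        rcases List.mem_cons.1 hy with rfl | hy
        · exact (hk h1).elim
        · exact ⟨y, hy, h1, h2⟩

lemma multiKey_cons (w : List String) (ws : List (List String)) (k : String) :
    multiKey (w :: ws) k ↔
      (k = keyOf w ∧ ∃ x ∈ ws, keyOf w = keyOf x ∧ spOf w ≠ spOf x) ∨ multiKey ws k := by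
  unfold multiKey
  constructor
  · rintro ⟨w1, hw1, w2, hw2, e1, e2, ne⟩
    rcases List.mem_cons.1 hw1 with h1 | h1 <;> rcases List.mem_cons.1 hw2 with h2 | h2
    · subst h1; subst h2; exact (ne rfl).elim
    · subst h1; exact Or.inl ⟨e1.symm, w2, h2, e1.trans e2.symm, ne⟩
    · subst h2; exact Or.inl ⟨e2.symm, w1, h1, e2.trans e1.symm, Ne.symm ne⟩
    · exact Or.inr ⟨w1, h1, w2, h2, e1, e2, ne⟩
  · rintro (⟨rfl, x, hx, hkx, hsx⟩ | ⟨w1, hw1, w2, hw2, e1, e2, ne⟩)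
    · exact ⟨w, List.mem_cons_self, x, List.mem_cons_of_mem _ hx, rfl, hkx.symm, hsx⟩
    · exact ⟨w1, List.mem_cons_of_mem _ hw1, w2, List.mem_cons_of_mem _ hw2, e1, e2, ne⟩

lemma multiKey_append (p : List (List String)) (w : List String) (k : String) :
    multiKey (p ++ [w]) k ↔
      multiKey p k ∨ (k = keyOf w ∧ ∃ x ∈ p, keyOf x = keyOf w ∧ spOf x ≠ spOf w) := by
  unfold multiKey
  constructor
  · rintro ⟨w1, hw1, w2, hw2, e1, e2, ne⟩
    rcases List.mem_append.1 hw1 with h1 | h1 <;> rcases List.mem_append.1 hw2 with h2 | h2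
    · exact Or.inl ⟨w1, h1, w2, h2, e1, e2, ne⟩
    · have h2' := List.mem_singleton.1 h2; subst h2'
      exact Or.inr ⟨e2.symm, w1, h1, e1.trans e2.symm, ne⟩
    · have h1' := List.mem_singleton.1 h1; subst h1'
      exact Or.inr ⟨e1.symm, w2, h2, e2.trans e1.symm, Ne.symm ne⟩
    · have h1' := List.mem_singleton.1 h1; subst h1'
      have h2' := List.mem_singleton.1 h2
      exact (ne (by rw [h2'])).elim
  · rintro (⟨w1, hw1, w2, hw2, e1, e2, ne⟩ | ⟨rfl, x, hx, hkx, hsx⟩)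
    · exact ⟨w1, List.mem_append_left _ hw1, w2, List.mem_append_left _ hw2, e1, e2, ne⟩
    · exact ⟨x, List.mem_append_left _ hx, w, List.mem_append_right _ (List.mem_singleton.2 rfl),
        hkx, rfl, hsx⟩

lemma pairsA_spec : ∀ (ws : List (List String)) (st : Int × List String),
    st.1 = (st.2.length : Int) → st.2.Nodup →
    (pairsA ws st).1 = ((pairsA ws st).2.length : Int) ∧ (pairsA ws st).2.Nodup ∧
      ∀ k, k ∈ (pairsA ws st).2 ↔ k ∈ st.2 ∨ multiKey ws k := by
  intro ws
  induction ws with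
  | nil =>
    intro st h1 h2
    refine ⟨h1, h2, fun k => ?_⟩
    simp [pairsA, multiKey]
  | cons w t ih =>
    intro st h1 h2
    rw [show pairsA (w :: t) st = pairsA t (t.foldl (stepA w) st) from rfl, foldl_stepA]
    by_cases h : keyOf w ∉ st.2 ∧ ∃ x ∈ t, keyOf w = keyOf x ∧ spOf w ≠ spOf x
    · rw [if_pos h]
      have hlen : (st.1 + 1 : Int) = (((st.2 ++ [keyOf w]).length : Nat) : Int) := by
        rw [h1]; push_cast [List.length_append, List.length_singleton]; omega
      have hnd : (st.2 ++ [keyOf w]).Nodup := by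
        rw [List.nodup_append]
        refine ⟨h2, List.nodup_singleton _, ?_⟩
        intro a ha b hb
        rw [List.mem_singleton] at hb
        subst hb
        exact fun e => h.1 (e ▸ ha)
      obtain ⟨c1, c2, c3⟩ := ih (st.1 + 1, st.2 ++ [keyOf w]) hlen hnd
      refine ⟨c1, c2, fun k => ?_⟩
      rw [c3 k, multiKey_cons]
      simp only [List.mem_append, List.mem_singleton]
      constructor
      · rintro ((hk | rfl) | hm)
        · exact Or.inl hk
        · exact Or.inr (Or.inl ⟨rfl, h.2⟩)
        · exact Or.inr (Or.inr hm)
      · rintro (hk | (⟨rfl, _⟩ | hm))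
        · exact Or.inl (Or.inl hk)
        · exact Or.inl (Or.inr rfl)
        · exact Or.inr hm
    · rw [if_neg h]
      obtain ⟨c1, c2, c3⟩ := ih st h1 h2
      refine ⟨c1, c2, fun k => ?_⟩
      rw [c3 k, multiKey_cons]
      constructor
      · rintro (hk | hm)
        · exact Or.inl hk
        · exact Or.inr (Or.inr hm)
      · rintro (hk | (⟨rfl, x, hx, hkx, hsx⟩ | hm))
        · exact Or.inl hk
        · refine Or.inl ?_
          by_contra hm
          exact h ⟨hm, x, hx, hkx, hsx⟩
        · exact Or.inr hm

lemma pyRange_nil_of_le {a b : Int} (h : b ≤ a) : PySem.List.pyRange a b = [] := by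
  have : ¬ a < b := by omega
  simp [PySem.List.pyRange, this]

lemma pairsA_short (l : List (List String)) (st : Int × List String) (h : l.length ≤ 1) :
    pairsA l st = st := by
  match l with
  | [] => rfl
  | [w] => rfl
  | w :: x :: t => simp at h

lemma outer_drop : ∀ (fuel k : Nat) (ws : List (List String)) (st : Int × List String),
    ws.length ≤ k + fuel →
    (PySem.List.pyRange (k : Int) (PySem.List.len ws - 1)).foldl
      (fun (st : Int × List String) i =>
        (PySem.List.pyRange (i + 1) (PySem.List.len ws)).foldl
          (fun st j => stepA (PySem.List.pyGetD ws i []) st (PySem.List.pyGetD ws j [])) st) st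
    = pairsA (ws.drop k) st := by
  intro fuel
  induction fuel with
  | zero =>
    intro k ws st hle
    rw [pyRange_nil_of_le (by simp only [PySem.List.len]; omega), List.foldl_nil,
      pairsA_short _ _ (by rw [List.length_drop]; omega)]
  | succ fuel ih =>
    intro k ws st hle
    by_cases hlt : (k : Int) < PySem.List.len ws - 1
    · have hk : k < ws.length := by simp only [PySem.List.len] at hlt; omega
      rw [PySem.List.pyRange_one_cons hlt, List.foldl_cons]
      have htn : ((k : Int) + 1).toNat = k + 1 := by omega
      have hinner :
          (PySem.List.pyRange ((k : Int) + 1) (PySem.List.len ws)).foldl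
            (fun st j => stepA (PySem.List.pyGetD ws (k : Int) []) st (PySem.List.pyGetD ws j []))
            st
          = (ws.drop (k + 1)).foldl (stepA (PySem.List.pyGetD ws (k : Int) [])) st := by
        rw [PySem.List.foldl_pyRange_pyGetD ws []
          (stepA (PySem.List.pyGetD ws (k : Int) [])) st (by omega), htn]
      rw [hinner]
      have hg : PySem.List.pyGetD ws (k : Int) [] = ws.getD k [] := PySem.List.pyGetD_natCast ws k []
      have hdrop : ws.drop k = ws.getD k [] :: ws.drop (k + 1) := by
        rw [List.getD_eq_getElem ws [] hk]
        exact (List.getElem_cons_drop hk).symm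
      rw [hg, hdrop, show pairsA (ws.getD k [] :: ws.drop (k + 1)) st
          = pairsA (ws.drop (k + 1)) ((ws.drop (k + 1)).foldl (stepA (ws.getD k [])) st) from rfl]
      have hcast : ((k : Int) + 1) = ((k + 1 : Nat) : Int) := by push_cast; ring
      rw [hcast]
      exact ih (k + 1) ws _ (by omega)
    · rw [pyRange_nil_of_le (by omega), List.foldl_nil, pairsA_short]
      rw [List.length_drop]
      simp only [PySem.List.len] at hlt
      omega

lemma homoA_eq (ws : List (List String)) : homo_counter ws = (pairsA ws (0, [])).1 := by
  have h := outer_drop ws.length 0 ws ((0 : Int), ([] : List String)) (by omega)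
  rw [Nat.cast_zero, List.drop_zero] at h
  have h0 : homo_counter ws =
      ((PySem.List.pyRange 0 (PySem.List.len ws - 1)).foldl
        (fun (st : Int × List String) i =>
          (PySem.List.pyRange (i + 1) (PySem.List.len ws)).foldl
            (fun st j => stepA (PySem.List.pyGetD ws i []) st (PySem.List.pyGetD ws j [])) st)
        ((0 : Int), ([] : List String))).1 := rfl
  rw [h0, h]

lemma homoB_eq (ws : List (List String)) :
    homo_counter_alt ws = PySem.Set.len (ws.foldl stepB (PySem.Dict.empty, PySem.Set.empty)).2 := rfl

lemma firstSp_append (p : List (List String)) (w : List String) (k : String) :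
    firstSp (p ++ [w]) k = (firstSp p k).or (if keyOf w = k then some (spOf w) else none) := by
  unfold firstSp
  rw [List.find?_append]
  cases hp : List.find? (fun w => keyOf w == k) p with
  | some x => simp
  | none =>
    simp only [Option.none_or, Option.map_none]
    rw [List.find?_singleton]
    by_cases hk : keyOf w = k <;> simp [hk]

lemma stateB_spec : ∀ (p : List (List String)),
    (∀ k, ((p.foldl stepB (PySem.Dict.empty, PySem.Set.empty)).1).get? k = firstSp p k)
  ∧ ((p.foldl stepB (PySem.Dict.empty, PySem.Set.empty)).2).Nodup
  ∧ (∀ k, k ∈ (p.foldl stepB (PySem.Dict.empty, PySem.Set.empty)).2 ↔ multiKey p k) := by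
  intro p
  induction p using List.reverseRecOn with
  | nil =>
    refine ⟨fun k => ?_, List.nodup_nil, fun k => ?_⟩
    · simp [firstSp, PySem.Dict.get?_empty]
    · simp only [List.foldl_nil]
      simp [multiKey, PySem.Set.empty]
  | append_singleton p w ih =>
    obtain ⟨ihd, ihn, ihm⟩ := ih
    rw [List.foldl_append, List.foldl_cons, List.foldl_nil]
    by_cases hc : (p.foldl stepB (PySem.Dict.empty, PySem.Set.empty)).1.contains (keyOf w) = true
    · -- key already present: its first spelling f is recorded
      have hsome : ((p.foldl stepB (PySem.Dict.empty, PySem.Set.empty)).1.get? (keyOf w)).isSome := by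
        rw [← PySem.Dict.contains_eq_isSome_get?]; exact hc
      obtain ⟨f, hf⟩ := Option.isSome_iff_exists.1 hsome
      have hfsp : firstSp p (keyOf w) = some f := by rw [← ihd]; exact hf
      obtain ⟨x0, hx0find, hx0sp⟩ : ∃ x0, p.find? (fun w' => keyOf w' == keyOf w) = some x0 ∧ spOf x0 = f := by
        rcases Option.map_eq_some_iff.1 hfsp with ⟨x0, h1, h2⟩
        exact ⟨x0, h1, h2⟩
      have hx0mem : x0 ∈ p := List.mem_of_find?_eq_some hx0find
      have hx0key : keyOf x0 = keyOf w := by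
        have := List.find?_some hx0find
        exact beq_iff_eq.1 this
      have hgd : (p.foldl stepB (PySem.Dict.empty, PySem.Set.empty)).1.getD (keyOf w) "" = f := by
        rw [PySem.Dict.getD_eq_get?_getD, hf]; rfl
      have hdictgoal : ∀ k, (p.foldl stepB (PySem.Dict.empty, PySem.Set.empty)).1.get? k
          = firstSp (p ++ [w]) k := by
        intro k
        rw [firstSp_append, ← ihd k]
        cases hq : (p.foldl stepB (PySem.Dict.empty, PySem.Set.empty)).1.get? k with
        | some v => simp
        | none =>
          rw [Option.none_or]
          by_cases hkk : keyOf w = k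
          · subst hkk
            rw [hq] at hf; exact absurd hf (by simp)
          · simp [hkk]
      by_cases hne : f = spOf w
      · -- same first spelling: state unchanged
        have hb : stepB (p.foldl stepB (PySem.Dict.empty, PySem.Set.empty)) w
            = p.foldl stepB (PySem.Dict.empty, PySem.Set.empty) := by
          simp only [stepB]
          rw [hc, hgd]
          simp [hne]
        rw [hb]
        refine ⟨hdictgoal, ihn, fun k => ?_⟩
        rw [ihm k, multiKey_append]
        constructor
        · exact Or.inl
        · rintro (hm | ⟨rfl, x, hx, hkx, hsx⟩)
          · exact hm
          · exact ⟨x, hx, x0, hx0mem, hkx, hx0key, by rw [hx0sp, hne]; exact hsx⟩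
      · -- a second distinct spelling: the key joins the set
        have hb : stepB (p.foldl stepB (PySem.Dict.empty, PySem.Set.empty)) w
            = ((p.foldl stepB (PySem.Dict.empty, PySem.Set.empty)).1,
               PySem.Set.add (p.foldl stepB (PySem.Dict.empty, PySem.Set.empty)).2 (keyOf w)) := by
          simp only [stepB]
          rw [hc, hgd]
          simp [hne]
        rw [hb]
        refine ⟨hdictgoal, PySem.Set.nodup_add _ _ ihn, fun k => ?_⟩
        rw [PySem.Set.mem_add, ihm k, multiKey_append]
        constructor
        · rintro (hm | rfl)
          · exact Or.inl hm
          · exact Or.inr ⟨rfl, x0, hx0mem, hx0key, by rw [hx0sp]; exact hne⟩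
        · rintro (hm | ⟨rfl, _⟩)
          · exact Or.inl hm
          · exact Or.inr rfl
    · -- new key: record its first spelling
      have hnone : (p.foldl stepB (PySem.Dict.empty, PySem.Set.empty)).1.get? (keyOf w) = none := by
        have := PySem.Dict.contains_eq_isSome_get?
          (d := (p.foldl stepB (PySem.Dict.empty, PySem.Set.empty)).1) (k := keyOf w)
        rw [this] at hc
        simpa using hc
      have hfind : p.find? (fun w' => keyOf w' == keyOf w) = none := by
        have := ihd (keyOf w)
        rw [hnone] at this
        unfold firstSp at this
        exact Option.map_eq_none_iff.1 this.symm
      have hb : stepB (p.foldl stepB (PySem.Dict.empty, PySem.Set.empty)) w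
          = ((p.foldl stepB (PySem.Dict.empty, PySem.Set.empty)).1.insert (keyOf w) (spOf w),
             (p.foldl stepB (PySem.Dict.empty, PySem.Set.empty)).2) := by
        have hc' : (p.foldl stepB (PySem.Dict.empty, PySem.Set.empty)).1.contains (keyOf w) = false := by
          simpa using hc
        simp only [stepB]
        rw [hc']
        simp
      rw [hb]
      refine ⟨fun k => ?_, ihn, fun k => ?_⟩
      · rw [PySem.Dict.get?_insert, firstSp_append, ← ihd k]
        by_cases hkk : k = keyOf w
        · subst hkk
          rw [hnone]
          simp
        · rw [if_neg hkk, if_neg (fun h => hkk h.symm), Option.or_none]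
      · rw [ihm k, multiKey_append]
        constructor
        · exact Or.inl
        · rintro (hm | ⟨rfl, x, hx, hkx, _⟩)
          · exact hm
          · have := List.find?_eq_none.1 hfind x hx
            exact absurd (beq_iff_eq.2 hkx) (by simpa using this)

-- ===== VERDICT (by name: the statement is the Claim_ definition above) =====
theorem homo_counter_spec : Claim_equal_homo_counter := by
  intro ws _ _
  show homo_counter ws = homo_counter_alt ws
  rw [homoA_eq, homoB_eq]
  have hA := pairsA_spec ws (0, []) (by simp) (by simp)
  have hB := stateB_spec ws
  have hperm : (pairsA ws (0, [])).2.Perm (ws.foldl stepB (PySem.Dict.empty, PySem.Set.empty)).2 := by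
    rw [List.perm_ext_iff_of_nodup hA.2.1 hB.2.1]
    intro k
    rw [hA.2.2 k, hB.2.2 k]
    simp
  rw [hA.1, PySem.Set.len]
  exact_mod_cast hperm.length_eq
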